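-- pv_equiv track=rewrite | github.com/xavierhardy/yamlfix | yamlfix/rules/empty_lines.py | extract_suffix
-- ===== SOURCE A (Python) =====
-- def extract_suffix(text: str) -> str:
--     result = []
--     for chrc in text:
--         if chrc in ("\n", "\r"):
--             result.append(chrc)
--         else:
--             result = []
--     return "".join(result)
-- ===== SOURCE B (Python) =====
-- def extract_suffix(text: str) -> str:
--     return text[len(text.rstrip("\r\n")):]
-- ===== Notes on version B (the rewrite author's own statement) =====
-- stated objective: idiomatic
-- what changed: Replaces the per-character accumulate/reset loop with a single rstrip over the newline/carriage-return set and a slice from the stripped length.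
import Mathlib
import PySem

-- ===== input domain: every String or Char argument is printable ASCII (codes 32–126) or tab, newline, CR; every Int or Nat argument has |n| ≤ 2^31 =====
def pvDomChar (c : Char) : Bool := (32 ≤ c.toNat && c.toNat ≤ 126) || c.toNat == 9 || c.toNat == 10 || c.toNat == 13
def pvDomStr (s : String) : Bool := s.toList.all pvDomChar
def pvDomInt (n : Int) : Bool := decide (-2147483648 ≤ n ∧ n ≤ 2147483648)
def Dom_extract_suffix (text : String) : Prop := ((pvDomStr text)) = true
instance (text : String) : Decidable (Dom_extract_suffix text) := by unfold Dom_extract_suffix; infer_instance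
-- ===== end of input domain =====

-- B replaces A's per-character accumulate/reset loop with rstrip over the newline/CR set + a slice from the stripped length (idiomatic, same cost).


-- ===== PORT A =====
-- result = []; for chrc in text: append if in ("\n","\r") else reset; "".join(result)
def extract_suffix (text : String) : String :=
  String.ofList (text.toList.foldl
    (fun result chrc => if chrc == '\n' || chrc == '\r' then result ++ [chrc] else [])
    [])

-- ===== PORT B =====
-- the rstrip call ported by hand (exact): drop trailing newline/CR chars
def extract_suffix_alt (text : String) : String :=
  let stripped := (text.toList.reverse.dropWhile (fun c => c == '\r' || c == '\n')).reverse
  String.ofList (PySem.List.slice text.toList (some (stripped.length : Int)) none)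

-- ===== PRECONDITION & SPEC =====
def Spec_extract_suffix (text : String) (out : String) : Prop := out = extract_suffix_alt text
instance (text : String) (out : String) : Decidable (Spec_extract_suffix text out) := by unfold Spec_extract_suffix; infer_instance

-- ===== CLAIM (what is proved, stated in full; the proofs are below) =====
def Claim_equal_extract_suffix : Prop := ∀ (text : String), Dom_extract_suffix text → Spec_extract_suffix text (extract_suffix text)

-- ===== LEMMAS AND PROOFS =====

/-- A's accumulate/reset loop computes the reversed longest `p`-suffix,
    generalized over the accumulator. -/
theorem foldl_reset_eq (p : Char → Bool) (l acc : List Char) :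
    l.foldl (fun r c => if p c then r ++ [c] else []) acc
      = (if l.all p then acc ++ l else (l.reverse.takeWhile p).reverse) := by
  induction l generalizing acc with
  | nil => simp
  | cons c t ih =>
    have hne : ¬ t.all p = true → ¬ ((List.takeWhile p t.reverse).length = t.reverse.length) := by
      intro hall h
      apply hall
      have he : List.takeWhile p t.reverse = t.reverse :=
        (List.takeWhile_prefix p).eq_of_length h
      refine List.all_eq_true.mpr fun x hx => ?_
      exact List.mem_takeWhile_imp (l := t.reverse) (p := p)
        (by rw [he]; exact List.mem_reverse.mpr hx)
    have hself : t.all p = true → List.takeWhile p t.reverse = t.reverse := by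
      intro hall
      refine List.takeWhile_eq_self_iff.mpr fun x hx => ?_
      exact List.all_eq_true.mp hall x (List.mem_reverse.mp hx)
    simp only [List.foldl_cons, List.all_cons, List.reverse_cons]
    by_cases hc : p c <;> by_cases ht : t.all p
    · rw [if_pos hc, ih, if_pos ht, if_pos (by simp [hc, ht])]; simp
    · rw [if_pos hc, ih, if_neg ht, if_neg (by simp [ht]),
        List.takeWhile_append, if_neg (hne ht)]
    · simp only [if_neg hc]
      rw [ih, if_pos ht, if_neg (by simp [hc]),
        List.takeWhile_append, if_pos (by rw [hself ht])]
      simp [hc]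
    · simp only [if_neg hc]
      rw [ih, if_neg ht, if_neg (by simp [hc]),
        List.takeWhile_append, if_neg (hne ht)]

theorem extract_suffix_spec : Claim_equal_extract_suffix := by
  intro text _
  unfold Spec_extract_suffix extract_suffix extract_suffix_alt
  have hp : (fun c => c == '\r' || c == '\n') = (fun c : Char => c == '\n' || c == '\r') := by
    funext c; exact Bool.or_comm _ _
  rw [hp]
  set p : Char → Bool := fun c => c == '\n' || c == '\r' with hpdef
  set l := text.toList
  rw [foldl_reset_eq p l []]
  -- B side: slice from (dropWhile length) = drop that many = reversed takeWhile of the reverse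
  simp only [PySem.List.slice_from_natCast]
  have hsplit : l = (l.reverse.dropWhile p).reverse ++ (l.reverse.takeWhile p).reverse := by
    conv_lhs => rw [← l.reverse_reverse, ← List.takeWhile_append_dropWhile (p := p) (l := l.reverse)]
    rw [List.reverse_append]
  have hlen : ((l.reverse.dropWhile p).reverse).length = (l.reverse.dropWhile p).length := by simp
  by_cases hall : l.all p
  · have : l.reverse.takeWhile p = l.reverse := by
      apply List.takeWhile_eq_self_iff.mpr
      intro c hc; exact List.all_eq_true.mp hall c (List.mem_reverse.mp hc)
    have hd : l.reverse.dropWhile p = [] := by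
      apply List.dropWhile_eq_nil_iff.mpr
      intro c hc; exact List.all_eq_true.mp hall c (List.mem_reverse.mp hc)
    simp [hall, hd]
  · rw [if_neg hall]
    conv_rhs => rw [hlen]
    conv_rhs => rw [hsplit]
    rw [List.drop_left' (by simp)]
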